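-- pv_equiv track=rewrite | github.com/sisjune/training-edge | engine/calendar.py | _fold_line
-- ===== SOURCE A (Python) =====
-- def _fold_line(line: str) -> str:
--     """Fold long ICS lines at 75 octets per RFC 5545."""
--     if len(line.encode("utf-8")) <= 75:
--         return line
--     result = []
--     current = ""
--     for char in line:
--         if len((current + char).encode("utf-8")) > 75:
--             result.append(current)
--             current = " " + char  # continuation line starts with space
--         else:
--             current += char
--     if current:
--         result.append(current)
--     return "\r\n".join(result)
-- ===== SOURCE B (Python) =====
-- def _fold_line(line: str) -> str:
--     """Fold long ICS lines at 75 octets per RFC 5545.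
--
--     Slices the line arithmetically into fixed-size chunks (75 for the first
--     line, 74 content chars + 1 leading space for each continuation) instead of
--     growing an accumulator character by character.  Exact for ASCII content,
--     where one character is one octet (the domain of this claim).
--     """
--     if len(line.encode("utf-8")) <= 75:
--         return line
--     chunks = [line[:75]]
--     for i in range(75, len(line), 74):
--         chunks.append(" " + line[i:i + 74])
--     return "\r\n".join(chunks)
-- ===== Notes on version B (the rewrite author's own statement) =====
-- stated objective: faster
-- what changed: Replaces A's per-character loop that grows an accumulator string and re-encodes it at every step with arithmetic slicing: the first 75 characters, then fixed 74-character continuation slices each prefixed by a space, joined with CRLF; exact on the ASCII domain where one character is one octet.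
import Mathlib
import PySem

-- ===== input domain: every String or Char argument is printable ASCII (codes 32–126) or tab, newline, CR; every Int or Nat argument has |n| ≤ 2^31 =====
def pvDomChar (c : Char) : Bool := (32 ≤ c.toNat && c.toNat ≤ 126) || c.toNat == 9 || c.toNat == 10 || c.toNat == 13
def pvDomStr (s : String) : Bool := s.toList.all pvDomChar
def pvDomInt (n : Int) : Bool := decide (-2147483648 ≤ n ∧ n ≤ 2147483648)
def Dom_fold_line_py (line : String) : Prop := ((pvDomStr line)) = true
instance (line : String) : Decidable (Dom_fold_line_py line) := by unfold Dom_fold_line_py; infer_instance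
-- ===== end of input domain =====

-- B replaces A's per-character accumulator loop with arithmetic slicing into fixed chunks
-- (75 for the first line, 74 + leading space for each continuation); exact on the ASCII domain,
-- where one character is one octet.

-- ===== PORT A =====
-- len(s.encode("utf-8")) = sum of the UTF-8 sizes of the code points (exact)
def pvByteLenA (l : List Char) : Nat := (l.map Char.utf8Size).sum

-- the 'for char in line' loop with state (result, current)
def pvFoldLoopA : List Char → List (List Char) → List Char → List (List Char)
  | [], res, cur => if cur = [] then res else res ++ [cur]
  | c :: r, res, cur =>
    if pvByteLenA (cur ++ [c]) > 75 then pvFoldLoopA r (res ++ [cur]) [' ', c]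
    else pvFoldLoopA r res (cur ++ [c])

def fold_line_py (line : String) : String :=
  if pvByteLenA line.toList ≤ 75 then line
  else String.ofList (PySem.Chars.join ['\r', '\n'] (pvFoldLoopA line.toList [] []))

-- ===== PORT B =====
def pvByteLenB (l : List Char) : Nat := (l.map Char.utf8Size).sum

-- 'for i in range(75, len(line), 74): chunks.append(" " + line[i:i+74])'
def pvChunksB (l : List Char) : List (List Char) :=
  if h : l = [] then []
  else (' ' :: l.take 74) :: pvChunksB (l.drop 74)
termination_by l.length
decreasing_by
  cases l with
  | nil => exact absurd rfl h
  | cons a t => simp [List.length_drop]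

def fold_line_py_alt (line : String) : String :=
  if pvByteLenB line.toList ≤ 75 then line
  else String.ofList (PySem.Chars.join ['\r', '\n']
    (line.toList.take 75 :: pvChunksB (line.toList.drop 75)))

-- ===== PRECONDITION & SPEC =====
def Spec_fold_line_py (line : String) (out : String) : Prop := out = fold_line_py_alt line
instance (line : String) (out : String) : Decidable (Spec_fold_line_py line out) := by unfold Spec_fold_line_py; infer_instance

-- ===== CLAIM (what is proved, stated in full; the proofs are below) =====
def Claim_equal_fold_line_py : Prop := ∀ (line : String), Dom_fold_line_py line → Spec_fold_line_py line (fold_line_py line)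

-- ===== LEMMAS AND PROOFS =====

lemma pvUtf8Size_one {c : Char} (h : pvDomChar c = true) : c.utf8Size = 1 := by
  simp only [pvDomChar, Bool.or_eq_true, Bool.and_eq_true, decide_eq_true_eq, beq_iff_eq] at h
  have hn : c.val.toNat ≤ 126 := by
    have : c.toNat ≤ 126 := by omega
    exact this
  have hv : c.val ≤ 0x7F := by
    rw [UInt32.le_iff_toNat_le]
    exact le_trans hn (by decide)
  simp [Char.utf8Size, hv]

lemma pvChunksB_cons (c : Char) (r : List Char) :
    pvChunksB (c :: r) = (' ' :: c :: r.take 73) :: pvChunksB (r.drop 73) := by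
  rw [pvChunksB]
  simp

lemma pvByteLenA_eq_length {l : List Char} (h : ∀ c ∈ l, pvDomChar c = true) :
    pvByteLenA l = l.length := by
  induction l with
  | nil => rfl
  | cons c t ih =>
    simp [pvByteLenA] at ih ⊢
    rw [pvUtf8Size_one (h c (by simp)), ih (fun x hx => h x (by simp [hx]))]
    omega

lemma pvLoopA_eq (r : List Char) : ∀ (res : List (List Char)) (cur : List Char),
    (∀ c ∈ r, pvDomChar c = true) → cur ≠ [] → cur.length ≤ 75 →
    pvByteLenA cur = cur.length →
    pvFoldLoopA r res cur =
      res ++ (cur ++ r.take (75 - cur.length)) :: pvChunksB (r.drop (75 - cur.length)) := by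
  induction r with
  | nil =>
    intro res cur _ hne _ _
    simp [pvFoldLoopA, hne, pvChunksB]
  | cons c r ih =>
    intro res cur hdom hne hle hbl
    have hc : pvDomChar c = true := hdom c (by simp)
    have hdom' : ∀ x ∈ r, pvDomChar x = true := fun x hx => hdom x (by simp [hx])
    have hblc : pvByteLenA (cur ++ [c]) = cur.length + 1 := by
      simp [pvByteLenA] at hbl ⊢
      rw [pvUtf8Size_one hc]; omega
    by_cases hfull : cur.length = 75
    · -- chunk is full: emit it, start a continuation " " + c
      have : pvByteLenA (cur ++ [c]) > 75 := by omega
      rw [pvFoldLoopA, if_pos this]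
      rw [ih (res ++ [cur]) [' ', c] hdom' (by simp) (by simp)
        (by simp [pvByteLenA, pvUtf8Size_one hc]; decide)]
      rw [hfull]
      simp only [Nat.sub_self, List.take_zero, List.drop_zero, List.append_nil, pvChunksB_cons]
      simp
    · -- room left: current grows by c
      have hlt : cur.length < 75 := by omega
      have : ¬ pvByteLenA (cur ++ [c]) > 75 := by omega
      rw [pvFoldLoopA, if_neg this]
      rw [ih res (cur ++ [c]) hdom' (by simp) (by simp; omega) (by simp [hblc])]
      have h1 : (75 - cur.length) = (75 - (cur ++ [c]).length) + 1 := by simp; omega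
      rw [h1]
      simp [List.take_succ_cons, List.drop_succ_cons]

theorem fold_line_py_spec : Claim_equal_fold_line_py := by
  intro line hdom
  unfold Spec_fold_line_py fold_line_py fold_line_py_alt
  have hdom' : ∀ c ∈ line.toList, pvDomChar c = true := by
    have := hdom
    unfold Dom_fold_line_py pvDomStr at this
    simpa [List.all_eq_true] using this
  have hA : pvByteLenA line.toList = line.toList.length := pvByteLenA_eq_length hdom'
  have hB : pvByteLenB line.toList = line.toList.length := pvByteLenA_eq_length hdom'
  by_cases hle : pvByteLenA line.toList ≤ 75
  · rw [if_pos hle, if_pos (by rw [hB, ← hA]; exact hle)]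
  · rw [if_neg hle, if_neg (by rw [hB, ← hA]; exact hle)]
    have hlen : 75 < line.toList.length := by omega
    cases hl : line.toList with
    | nil => rw [hl] at hlen; simp at hlen
    | cons c r =>
      rw [hl] at hdom' hlen
      have hc : pvDomChar c = true := hdom' c (by simp)
      have hdom'' : ∀ x ∈ r, pvDomChar x = true := fun x hx => hdom' x (by simp [hx])
      rw [pvFoldLoopA, if_neg (by simp [pvByteLenA, pvUtf8Size_one hc])]
      rw [show ([] : List Char) ++ [c] = [c] from rfl]
      rw [pvLoopA_eq r [] [c] hdom'' (by simp) (by simp)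
        (by simp [pvByteLenA, pvUtf8Size_one hc])]
      simp [List.take_succ_cons, List.drop_succ_cons]
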